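-- pv_equiv track=rewrite | github.com/rizveeredwan/Incremental-Sequential-Pattern-Mining-with-SP-Tree. | Implementation/Dataset/RealDatasetMaker.py | GettingTheEvents
-- ===== SOURCE A (Python) =====
-- def GettingTheEvents(list):
--     temp = []
--     sequence = []
--     for i in range(0,len(list)):
--         if(list[i] == -1):
--             sequence.append(temp)
--             temp = []
--         elif(list[i] == -2):
--             break
--         else:
--             temp.append(list[i])
--     return sequence
-- ===== SOURCE B (Python) =====
-- def GettingTheEvents(list):
--     cut = list.index(-2) if -2 in list else len(list)
--     prefix = list[:cut]
--     positions = [p for p, v in enumerate(prefix) if v == -1]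
--     out = []
--     prev = 0
--     for p in positions:
--         out.append(prefix[prev:p])
--         prev = p + 1
--     return out
-- ===== Notes on version B (the rewrite author's own statement) =====
-- stated objective: alternative
-- what changed: Replaces the single running-accumulator loop with break by an index-then-slice decomposition: cut the list at the first -2, collect the positions of all -1 delimiters in one scan, then emit the segments as slices between consecutive delimiter positions (the tail after the last -1 is never materialised).
import Mathlib
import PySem

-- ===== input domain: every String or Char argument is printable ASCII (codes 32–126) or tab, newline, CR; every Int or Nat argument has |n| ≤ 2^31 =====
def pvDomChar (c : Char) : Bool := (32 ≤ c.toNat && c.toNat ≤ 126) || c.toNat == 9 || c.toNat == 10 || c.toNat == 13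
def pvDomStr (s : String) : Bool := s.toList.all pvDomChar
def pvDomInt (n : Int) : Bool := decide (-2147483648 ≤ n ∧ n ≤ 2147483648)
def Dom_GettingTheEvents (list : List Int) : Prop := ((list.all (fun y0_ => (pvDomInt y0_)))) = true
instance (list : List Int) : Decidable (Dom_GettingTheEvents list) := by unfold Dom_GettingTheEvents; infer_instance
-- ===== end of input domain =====

-- B replaces A's running-accumulator loop with break by an index-then-slice decomposition (alternative; same cost).

-- ===== PORT A =====
-- A's index loop with break, as structural recursion over the same state (temp, sequence).
def pvGoA : List Int → List Int → List (List Int) → List (List Int)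
  | [], _temp, seq => seq
  | x :: xs, temp, seq =>
    if x = -1 then pvGoA xs [] (seq ++ [temp])
    else if x = -2 then seq
    else pvGoA xs (temp ++ [x]) seq

def GettingTheEvents (list : List Int) : List (List Int) := pvGoA list [] []

-- ===== PORT B =====
def GettingTheEvents_alt (list : List Int) : List (List Int) :=
  let cut : Int := match PySem.List.index? list (-2) with
    | some i => (i : Int)
    | none => (list.length : Int)
  let pref := PySem.List.slice list none (some cut)
  let positions := ((PySem.List.enumerate pref 0).filter (fun pv => pv.2 == -1)).map (fun pv => pv.1)
  (positions.foldl (fun (st : List (List Int) × Int) p =>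
      (st.1 ++ [PySem.List.slice pref (some st.2) (some p)], p + 1)) ([], 0)).1

-- ===== PRECONDITION & SPEC =====
def Spec_GettingTheEvents (list : List Int) (out : List (List Int)) : Prop := out = GettingTheEvents_alt list
instance (list : List Int) (out : List (List Int)) : Decidable (Spec_GettingTheEvents list out) := by unfold Spec_GettingTheEvents; infer_instance

-- ===== CLAIM (what is proved, stated in full; the proofs are below) =====
def Claim_equal_GettingTheEvents : Prop := ∀ (list : List Int), Dom_GettingTheEvents list → Spec_GettingTheEvents list (GettingTheEvents list)

-- ===== LEMMAS AND PROOFS =====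

-- canonical splitter: segments of l between -1 delimiters, trailing segment dropped
def pvSplit1 : List Int → List Int → List (List Int)
  | [], _ => []
  | x :: xs, t => if x = -1 then t :: pvSplit1 xs [] else pvSplit1 xs (t ++ [x])

-- delimiter positions
def pvPos (l : List Int) (s : Int) : List Int :=
  ((PySem.List.enumerate l s).filter (fun pv => pv.2 == -1)).map (fun pv => pv.1)

lemma pvPos_nil (s : Int) : pvPos [] s = [] := by
  simp [pvPos, PySem.List.enumerate_nil]

lemma pvPos_cons (x : Int) (xs : List Int) (s : Int) :
    pvPos (x :: xs) s = (if x = -1 then [s] else []) ++ pvPos xs (s + 1) := by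
  by_cases h : x = -1 <;> simp [pvPos, PySem.List.enumerate_cons, h]

lemma pvPos_append (a b : List Int) (s : Int) :
    pvPos (a ++ b) s = pvPos a s ++ pvPos b (s + a.length) := by
  induction a generalizing s with
  | nil => simp [pvPos_nil]
  | cons x xs ih =>
    rw [List.cons_append, pvPos_cons, pvPos_cons, ih, List.append_assoc]
    have h1 : s + 1 + (xs.length : Int) = s + ((x :: xs).length : Int) := by
      push_cast [List.length_cons]; ring
    rw [h1]

lemma pvPos_no (a : List Int) (h : (-1 : Int) ∉ a) (s : Int) : pvPos a s = [] := by
  induction a generalizing s with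
  | nil => exact pvPos_nil s
  | cons x xs ih =>
    rw [pvPos_cons]
    have hx : x ≠ -1 := fun hx => h (hx ▸ List.mem_cons_self)
    simp [hx, ih (fun hm => h (List.mem_cons_of_mem _ hm))]

lemma pvSplit1_no (a : List Int) (h : (-1 : Int) ∉ a) (t : List Int) : pvSplit1 a t = [] := by
  induction a generalizing t with
  | nil => rfl
  | cons x xs ih =>
    have hx : x ≠ -1 := fun hx => h (hx ▸ List.mem_cons_self)
    simp [pvSplit1, hx, ih (fun hm => h (List.mem_cons_of_mem _ hm))]

lemma pvSplit1_split (v r : List Int) (hv : (-1 : Int) ∉ v) (t : List Int) :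
    pvSplit1 (v ++ -1 :: r) t = (t ++ v) :: pvSplit1 r [] := by
  induction v generalizing t with
  | nil => simp [pvSplit1]
  | cons x xs ih =>
    have hx : x ≠ -1 := fun hx => hv (hx ▸ List.mem_cons_self)
    simp [pvSplit1, hx, ih (fun hm => hv (List.mem_cons_of_mem _ hm)), List.append_assoc]

-- A's loop equals the canonical splitter of the pref before the first -2
lemma pvGoA_eq (l : List Int) : ∀ (t : List Int) (s : List (List Int)),
    pvGoA l t s = s ++ pvSplit1 (l.takeWhile (fun x => x ≠ -2)) t := by
  induction l with
  | nil => intro t s; simp [pvGoA, pvSplit1]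
  | cons x xs ih =>
    intro t s
    by_cases h1 : x = -1
    · subst h1
      simp [pvGoA, ih, pvSplit1]
    · by_cases h2 : x = -2
      · subst h2; simp [pvGoA, pvSplit1]
      · simp [pvGoA, h1, h2, ih, pvSplit1]

-- B's prefix equals that takeWhile pref
lemma pvPrefix_eq (l : List Int) :
    PySem.List.slice l none (some (match PySem.List.index? l (-2) with
      | some i => (i : Int) | none => (l.length : Int))) = l.takeWhile (fun x => x ≠ -2) := by
  cases h : PySem.List.index? l (-2) with
  | none =>
    have hmem : (-2 : Int) ∉ l := (PySem.List.index?_eq_none_iff l (-2)).mp h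
    rw [PySem.List.slice_to_natCast]
    rw [List.take_of_length_le (le_refl _)]
    symm
    exact List.takeWhile_eq_self_iff.mpr (fun x hx => by simp; exact fun hx2 => hmem (hx2 ▸ hx))
  | some k =>
    obtain ⟨pre, suf, hl, hlen, hnm⟩ := (PySem.List.index?_eq_some_iff l (-2) k).mp h
    rw [PySem.List.slice_to_natCast, hl, ← hlen]
    rw [List.take_append_of_le_length (le_refl _), List.take_of_length_le (le_refl _)]
    have hpre : pre.takeWhile (fun x => decide (x ≠ -2)) = pre :=
      List.takeWhile_eq_self_iff.mpr (fun x hx => by simp; exact fun hx2 => hnm (hx2 ▸ hx))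
    rw [List.takeWhile_append, hpre]
    simp

-- the index-then-slice fold equals the canonical splitter
lemma pvFold_eq (full : List Int) : ∀ (n : Nat) (l u : List Int) (acc : List (List Int)),
    full = u ++ l → l.length ≤ n →
    (List.foldl (fun (st : List (List Int) × Int) p =>
        (st.1 ++ [PySem.List.slice full (some st.2) (some p)], p + 1))
      (acc, (u.length : Int)) (pvPos l (u.length : Int))).1
    = acc ++ pvSplit1 l [] := by
  intro n
  induction n with
  | zero =>
    intro l u acc hfull hlen
    have : l = [] := List.length_eq_zero_iff.mp (Nat.le_zero.mp hlen)
    subst this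
    simp [pvPos_nil, pvSplit1]
  | succ n ih =>
    intro l u acc hfull hlen
    by_cases hm : (-1 : Int) ∈ l
    · obtain ⟨k, hk⟩ := Option.isSome_iff_exists.mp ((PySem.List.index?_isSome_iff l (-1)).mpr hm)
      obtain ⟨v, r, hl, hlen', hnv⟩ := (PySem.List.index?_eq_some_iff l (-1) k).mp hk
      subst hl
      rw [pvPos_append, pvPos_no v hnv, pvPos_cons]
      have hslice : PySem.List.slice full (some (u.length : Int))
          (some ((u.length : Int) + (v.length : Int))) = v := by
        rw [PySem.List.slice_natCast_add, hfull, List.drop_append_of_le_length (le_refl _)]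
        simp
      simp only [List.nil_append, if_true, List.singleton_append, List.foldl_cons, hslice]
      have hfull' : full = (u ++ v ++ [-1]) ++ r := by
        rw [hfull]; simp
      have hlen2 : r.length ≤ n := by
        have := hlen; simp [List.length_append] at this; omega
      have hstart : (u.length : Int) + (v.length : Int) + 1 = (((u ++ v ++ [-1]).length : Nat) : Int) := by
        simp [List.length_append]; ring
      rw [hstart]
      rw [ih r (u ++ v ++ [-1]) (acc ++ [v]) hfull' hlen2]
      rw [pvSplit1_split v r hnv]
      simp
    · rw [pvPos_no l hm, pvSplit1_no l hm]
      simp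

-- ===== VERDICT (by name: the statement is the Claim_ definition above) =====
theorem GettingTheEvents_spec : Claim_equal_GettingTheEvents := by
  intro list _
  unfold Spec_GettingTheEvents GettingTheEvents GettingTheEvents_alt
  rw [pvGoA_eq]
  simp only []
  rw [pvPrefix_eq]
  have h := pvFold_eq (list.takeWhile (fun x => x ≠ -2)) (list.takeWhile (fun x => x ≠ -2)).length
    (list.takeWhile (fun x => x ≠ -2)) [] [] (by simp) (le_refl _)
  simp only [List.length_nil, Nat.cast_zero] at h
  rw [pvPos] at h
  rw [h]
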